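-- pv_equiv track=rewrite | github.com/diegoMV17/ejerciciosDeMaraton | Impresoras.py | min_days_to_print
-- ===== SOURCE A (Python) =====
-- def min_days_to_print(n):
--     days = 0
--     printers = 1
--     statues = 0
--
--     while statues < n:
--         if printers >= (n - statues):
--             days += 1
--             break
--
--         if printers * 2 <= (n - statues):
--             printers *= 2
--         else:
--             statues += printers
--
--         days += 1
--
--     return days
-- ===== SOURCE B (Python) =====
-- def min_days_to_print(n):
--     if n <= 0:
--         return 0
--     printers = 1
--     d = 0
--     while printers * 2 <= n:
--         printers *= 2
--         d += 1
--     return d + 1 if printers == n else d + 2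
-- ===== Notes on version B (the rewrite author's own statement) =====
-- stated objective: simpler
-- what changed: Replaces the three-state day-by-day simulation (days/printers/statues with a three-way branch) by a single doubling-count loop: statues stays zero during all doubling so the remaining need is constant, so B just counts doublings while doubling would not overshoot, then adds one final day when the printer count hits n exactly, else a produce day plus a final day.
import Mathlib
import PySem

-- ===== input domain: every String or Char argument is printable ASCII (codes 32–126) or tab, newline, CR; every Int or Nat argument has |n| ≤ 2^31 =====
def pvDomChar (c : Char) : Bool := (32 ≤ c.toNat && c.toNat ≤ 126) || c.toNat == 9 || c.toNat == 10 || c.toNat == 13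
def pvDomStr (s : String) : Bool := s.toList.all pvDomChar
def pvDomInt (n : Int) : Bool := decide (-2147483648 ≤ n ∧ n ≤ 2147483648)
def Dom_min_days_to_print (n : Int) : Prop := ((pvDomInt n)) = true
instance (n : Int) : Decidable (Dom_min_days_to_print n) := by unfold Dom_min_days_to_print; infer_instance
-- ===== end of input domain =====

-- B replaces A's three-state day simulation by a single doubling-count loop (statues stays 0 during doubling, so remaining need is constant n); objective: simpler.


-- ===== PORT A =====
-- A's while loop, step for step, as structural recursion on a fuel counter that
-- over-approximates the number of iterations (n.toNat + 2 always suffices; the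
-- fuel = 0 branch is unreachable on the actual calls).
def minDaysLoopA (fuel : Nat) (n days printers statues : Int) : Int :=
  match fuel with
  | 0 => days
  | fuel + 1 =>
    if statues < n then
      if printers ≥ n - statues then days + 1
      else if printers * 2 ≤ n - statues then
        minDaysLoopA fuel n (days + 1) (printers * 2) statues
      else
        minDaysLoopA fuel n (days + 1) printers (statues + printers)
    else days

def min_days_to_print (n : Int) : Int := minDaysLoopA (n.toNat + 2) n 0 1 0

-- ===== PORT B =====
-- B's counting loop, same fuel device (n.toNat + 1 suffices).
def minDaysLoopB (fuel : Nat) (n d p : Int) : Int :=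
  match fuel with
  | 0 => d
  | fuel + 1 =>
    if p * 2 ≤ n then minDaysLoopB fuel n (d + 1) (p * 2)
    else if p = n then d + 1 else d + 2

def min_days_to_print_alt (n : Int) : Int :=
  if n ≤ 0 then 0 else minDaysLoopB (n.toNat + 1) n 0 1

-- ===== PRECONDITION & SPEC =====
def Spec_min_days_to_print (n : Int) (out : Int) : Prop := out = min_days_to_print_alt n
instance (n : Int) (out : Int) : Decidable (Spec_min_days_to_print n out) := by unfold Spec_min_days_to_print; infer_instance

-- ===== CLAIM (what is proved, stated in full; the proofs are below) =====
def Claim_equal_min_days_to_print : Prop := ∀ (n : Int), Dom_min_days_to_print n → Spec_min_days_to_print n (min_days_to_print n)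

-- ===== LEMMAS AND PROOFS =====
-- while statues = 0, A's loop and B's loop agree, given 0 < p ≤ n and enough fuel
lemma minDays_loop_eq (k : Nat) : ∀ (p n d : Int) (fa fb : Nat), 0 < p → p ≤ n →
    (n - p).toNat ≤ k → (n - p).toNat + 2 ≤ fa → (n - p).toNat + 1 ≤ fb →
    minDaysLoopA fa n d p 0 = minDaysLoopB fb n d p := by
  induction k with
  | zero =>
    intro p n d fa fb hp hpn hk hfa hfb
    obtain ⟨fa, rfl⟩ : ∃ m, fa = m + 1 := ⟨fa - 1, by omega⟩
    obtain ⟨fb, rfl⟩ : ∃ m, fb = m + 1 := ⟨fb - 1, by omega⟩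
    have hpe : p = n := by omega
    simp only [minDaysLoopA, minDaysLoopB]
    rw [if_pos (by omega : (0:Int) < n), if_pos (by omega : p ≥ n - 0),
        if_neg (by omega : ¬ p * 2 ≤ n), if_pos hpe]
  | succ k ih =>
    intro p n d fa fb hp hpn hk hfa hfb
    obtain ⟨fa, rfl⟩ : ∃ m, fa = m + 1 := ⟨fa - 1, by omega⟩
    obtain ⟨fb, rfl⟩ : ∃ m, fb = m + 1 := ⟨fb - 1, by omega⟩
    rcases eq_or_lt_of_le hpn with hpe | hlt
    · simp only [minDaysLoopA, minDaysLoopB]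
      rw [if_pos (by omega : (0:Int) < n), if_pos (by omega : p ≥ n - 0),
          if_neg (by omega : ¬ p * 2 ≤ n), if_pos hpe]
    · simp only [minDaysLoopA, minDaysLoopB]
      rw [if_pos (by omega : (0:Int) < n), if_neg (by omega : ¬ p ≥ n - 0)]
      by_cases h3 : p * 2 ≤ n - 0
      · -- both loops double
        rw [if_pos h3, if_pos (by omega : p * 2 ≤ n)]
        exact ih (p * 2) n (d + 1) fa fb (by omega) (by omega) (by omega) (by omega) (by omega)
      · -- A produces once, then breaks on the next iteration; B returns d + 2
        rw [if_neg h3, if_neg (by omega : ¬ p * 2 ≤ n), if_neg (by omega : ¬ p = n)]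
        obtain ⟨fa, rfl⟩ : ∃ m, fa = m + 1 := ⟨fa - 1, by omega⟩
        simp only [minDaysLoopA]
        rw [if_pos (by omega : (0:Int) + p < n), if_pos (by omega : p ≥ n - (0 + p))]
        omega

-- ===== VERDICT (by name: the statement is the Claim_ definition above) =====
theorem min_days_to_print_spec : Claim_equal_min_days_to_print := by
  intro n _
  unfold Spec_min_days_to_print min_days_to_print min_days_to_print_alt
  by_cases hn : n ≤ 0
  · rw [if_pos hn]
    simp only [minDaysLoopA]
    rw [if_neg (by omega : ¬ (0:Int) < n)]
  · rw [if_neg hn]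
    exact minDays_loop_eq (n - 1).toNat 1 n 0 (n.toNat + 2) (n.toNat + 1)
      (by norm_num) (by omega) (by omega) (by omega) (by omega)
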